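-- pv_equiv track=rewrite | github.com/MuhammadAzan169/AI-Meeting-Sense | Normal-RealState-Summary.py | _parse_and_validate_sections
-- ===== SOURCE A (Python) =====
-- from typing import Optional, List, Dict, Any, Tuple
--
-- def _parse_and_validate_sections(analysis: str) -> Dict[str, Any]:
--     """Parse and validate coaching evaluation sections"""
--     # First parse into sections
--     sections = {}
--     current_section = None
--     current_content = []
--
--     lines = analysis.split('\n')
--
--     for line in lines:
--         line_stripped = line.strip()
--
--         # Main section detection (##)
--         if line_stripped.startswith('## '):
--             if current_section:
--                 sections[current_section] = '\n'.join(current_content).strip()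
--
--             current_section = line_stripped[3:].strip()
--             current_content = []
--
--         # Content accumulation - keep original line for formatting
--         elif current_section is not None:
--             current_content.append(line)
--
--     # Save last section
--     if current_section:
--         sections[current_section] = '\n'.join(current_content).strip()
--
--     # For coaching evaluation, we keep content mostly as-is for proper formatting
--     # The PDF generation methods will handle specific parsing
--     return sections
-- ===== SOURCE B (Python) =====
-- def _is_header(line):
--     return line.strip().startswith('## ')
--
-- def _parse_and_validate_sections(analysis):
--     """Parse coaching evaluation sections by splitting the lines into header-led chunks."""
--     lines = analysis.split('\n')
--     # skip everything before the first header
--     while lines and not _is_header(lines[0]):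
--         lines = lines[1:]
--     sections = {}
--     while lines:
--         name = lines[0].strip()[3:].strip()
--         rest = lines[1:]
--         body = []
--         while rest and not _is_header(rest[0]):
--             body.append(rest[0])
--             rest = rest[1:]
--         if name:
--             sections[name] = '\n'.join(body).strip()
--         lines = rest
--     return sections
-- ===== Notes on version B (the rewrite author's own statement) =====
-- stated objective: alternative
-- what changed: B replaces A's single stateful for-loop (current-section/current-content accumulators with a trailing flush) by a chunking decomposition: skip lines before the first header, then repeatedly take one header and the run of non-header lines after it as a chunk, assigning each named chunk into the dict.
import Mathlib
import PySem

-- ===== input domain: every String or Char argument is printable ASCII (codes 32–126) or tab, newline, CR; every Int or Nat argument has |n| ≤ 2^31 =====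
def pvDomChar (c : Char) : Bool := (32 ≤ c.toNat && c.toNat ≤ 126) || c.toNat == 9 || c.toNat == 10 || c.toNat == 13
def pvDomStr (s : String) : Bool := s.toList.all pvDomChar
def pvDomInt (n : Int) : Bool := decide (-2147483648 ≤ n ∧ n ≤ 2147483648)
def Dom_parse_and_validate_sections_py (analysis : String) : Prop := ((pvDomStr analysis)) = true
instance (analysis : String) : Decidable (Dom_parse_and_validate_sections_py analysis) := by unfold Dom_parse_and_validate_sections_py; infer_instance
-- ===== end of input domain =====

-- B parses by chunking the line list at headers (dropWhile/takeWhile decomposition) instead of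
-- A's single stateful accumulator loop; objective: alternative decomposition, same cost.

-- ===== PORT A =====
-- the repeated Python save snippet `if current_section: sections[current_section] = '\n'.join(current_content).strip()`
def pvASave (d : PySem.Dict String String) (cs : Option String) (cc : List String) :
    PySem.Dict String String :=
  match cs with
  | some s => if s = "" then d else d.insert s (PySem.Str.strip (PySem.Str.join "\n" cc))
  | none => d

-- one iteration of A's `for line in lines` loop over state (sections, current_section, current_content)
def pvAStep : PySem.Dict String String × Option String × List String → String →
    PySem.Dict String String × Option String × List String
  | (d, cs, cc), line =>
    let ls := PySem.Str.strip line
    if PySem.Str.startswith ls "## " then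
      (pvASave d cs cc, some (PySem.Str.strip (PySem.Str.slice ls (some 3) none)), [])
    else
      match cs with
      | some _ => (d, cs, cc ++ [line])
      | none => (d, cs, cc)

def parse_and_validate_sections_py (analysis : String) : List (String × String) :=
  let lines := (PySem.Chars.splitOn analysis.toList "\n".toList).map String.ofList
  let st := lines.foldl pvAStep (PySem.Dict.empty, none, [])
  (pvASave st.1 st.2.1 st.2.2).items

-- ===== PORT B =====
def pvIsHeader (line : String) : Bool :=
  PySem.Str.startswith (PySem.Str.strip line) "## "

-- B's outer while loop: lines starts with a header; consume one chunk, recurse on the rest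
def pvAltLoop : List String → PySem.Dict String String → PySem.Dict String String
  | [], d => d
  | h :: rest, d =>
    let name := PySem.Str.strip (PySem.Str.slice (PySem.Str.strip h) (some 3) none)
    let body := rest.takeWhile (fun l => !pvIsHeader l)
    let rest' := rest.dropWhile (fun l => !pvIsHeader l)
    pvAltLoop rest' (if name = "" then d
                     else d.insert name (PySem.Str.strip (PySem.Str.join "\n" body)))
termination_by ls _ => ls.length
decreasing_by simpa using Nat.lt_succ_of_le (List.length_dropWhile_le _ _)

def parse_and_validate_sections_py_alt (analysis : String) : List (String × String) :=
  let lines := (PySem.Chars.splitOn analysis.toList "\n".toList).map String.ofList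
  (pvAltLoop (lines.dropWhile (fun l => !pvIsHeader l)) PySem.Dict.empty).items

-- ===== PRECONDITION & SPEC =====
def Spec_parse_and_validate_sections_py (analysis : String) (out : List (String × String)) : Prop := out = parse_and_validate_sections_py_alt analysis
instance (analysis : String) (out : List (String × String)) : Decidable (Spec_parse_and_validate_sections_py analysis out) := by unfold Spec_parse_and_validate_sections_py; infer_instance

-- ===== CLAIM (what is proved, stated in full; the proofs are below) =====
def Claim_equal_parse_and_validate_sections_py : Prop := ∀ (analysis : String), Dom_parse_and_validate_sections_py analysis → Spec_parse_and_validate_sections_py analysis (parse_and_validate_sections_py analysis)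

-- ===== LEMMAS AND PROOFS =====

-- with no current section, non-header lines leave A's state unchanged
lemma pvA_skip (lines : List String) (d : PySem.Dict String String) :
    lines.foldl pvAStep (d, none, []) =
    (lines.dropWhile (fun l => !pvIsHeader l)).foldl pvAStep (d, none, []) := by
  induction lines with
  | nil => rfl
  | cons h t ih =>
    by_cases hh : pvIsHeader h = true
    · simp [hh]
    · have hh' : pvIsHeader h = false := by simpa using hh
      have hstep : pvAStep (d, none, ([] : List String)) h = (d, none, []) := by
        simp [pvAStep, pvIsHeader] at hh' ⊢
        simp [hh']
      simp [hh', List.foldl_cons, hstep, ih]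

-- with a current section, a run of non-header lines just accumulates into current_content
lemma pvA_body (body : List String) (h : ∀ l ∈ body, pvIsHeader l = false) :
    ∀ (rest : List String) (d : PySem.Dict String String) (s : String) (cc : List String),
    (body ++ rest).foldl pvAStep (d, some s, cc) = rest.foldl pvAStep (d, some s, cc ++ body) := by
  induction body with
  | nil => intro rest d s cc; simp
  | cons b t ih =>
    intro rest d s cc
    have hb : pvIsHeader b = false := h b (by simp)
    have hstep : pvAStep (d, some s, cc) b = (d, some s, cc ++ [b]) := by
      simp [pvAStep, pvIsHeader] at hb ⊢
      simp [hb]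
    have ht : ∀ l ∈ t, pvIsHeader l = false := fun l hl => h l (by simp [hl])
    simp only [List.cons_append, List.foldl_cons, hstep, ih ht]
    simp

-- main invariant: from an open section, A's remaining loop + final save equals B's chunk loop
lemma pvA_main : ∀ (n : Nat) (lines : List String), lines.length ≤ n →
    ∀ (d : PySem.Dict String String) (s : String) (cc : List String),
    (let st := lines.foldl pvAStep (d, some s, cc); pvASave st.1 st.2.1 st.2.2) =
    pvAltLoop (lines.dropWhile (fun l => !pvIsHeader l))
      (pvASave d (some s) (cc ++ lines.takeWhile (fun l => !pvIsHeader l))) := by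
  intro n
  induction n with
  | zero =>
    intro lines hlen d s cc
    have : lines = [] := List.eq_nil_of_length_eq_zero (Nat.le_zero.mp hlen)
    subst this
    simp [pvAltLoop]
  | succ n ih =>
    intro lines hlen d s cc
    have hsplit := List.takeWhile_append_dropWhile (p := fun l => !pvIsHeader l) (l := lines)
    have hbody : ∀ l ∈ lines.takeWhile (fun l => !pvIsHeader l), pvIsHeader l = false := by
      intro l hl
      have := List.mem_takeWhile_imp hl
      simpa using this
    conv_lhs => rw [← hsplit]
    rw [pvA_body _ hbody]
    cases hdrop : lines.dropWhile (fun l => !pvIsHeader l) with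
    | nil => simp [pvAltLoop]
    | cons hh rs =>
      have hhh : pvIsHeader hh = true := by
        have := List.head_dropWhile_not (p := fun l => !pvIsHeader l) (l := lines)
          (by simp [hdrop])
        simpa [hdrop] using this
      have hstep : pvAStep (d, some s, cc ++ lines.takeWhile (fun l => !pvIsHeader l)) hh =
          (pvASave d (some s) (cc ++ lines.takeWhile (fun l => !pvIsHeader l)),
           some (PySem.Str.strip (PySem.Str.slice (PySem.Str.strip hh) (some 3) none)), []) := by
        simp [pvAStep, pvIsHeader] at hhh ⊢
        simp [hhh]
      have hrs : rs.length ≤ n := by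
        have h1 : (lines.dropWhile (fun l => !pvIsHeader l)).length ≤ lines.length :=
          List.length_dropWhile_le _ _
        rw [hdrop] at h1
        simp at h1
        omega
      rw [List.foldl_cons, hstep, ih rs hrs]
      rw [pvAltLoop]
      simp [pvASave]

lemma pv_lines (lines : List String) :
    (pvASave (lines.foldl pvAStep (PySem.Dict.empty, none, [])).1
        (lines.foldl pvAStep (PySem.Dict.empty, none, [])).2.1
        (lines.foldl pvAStep (PySem.Dict.empty, none, [])).2.2).items =
    (pvAltLoop (lines.dropWhile (fun l => !pvIsHeader l)) PySem.Dict.empty).items := by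
  rw [pvA_skip]
  cases hdrop : lines.dropWhile (fun l => !pvIsHeader l) with
  | nil => simp [pvAltLoop, pvASave]
  | cons hh rs =>
    have hhh : pvIsHeader hh = true := by
      have := List.head_dropWhile_not (p := fun l => !pvIsHeader l) (l := lines)
        (by simp [hdrop])
      simpa [hdrop] using this
    have hstep : pvAStep (PySem.Dict.empty, none, ([] : List String)) hh =
        (PySem.Dict.empty,
         some (PySem.Str.strip (PySem.Str.slice (PySem.Str.strip hh) (some 3) none)), []) := by
      simp [pvAStep, pvIsHeader, pvASave] at hhh ⊢
      simp [hhh]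
    rw [List.foldl_cons, hstep]
    have := pvA_main rs.length rs le_rfl PySem.Dict.empty
      (PySem.Str.strip (PySem.Str.slice (PySem.Str.strip hh) (some 3) none)) []
    simp only [List.nil_append] at this
    rw [this, pvAltLoop]
    simp [pvASave]

-- ===== VERDICT (by name: the statement is the Claim_ definition above) =====
theorem parse_and_validate_sections_py_spec : Claim_equal_parse_and_validate_sections_py := by
  intro analysis _
  unfold Spec_parse_and_validate_sections_py
  unfold parse_and_validate_sections_py parse_and_validate_sections_py_alt
  exact pv_lines _
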